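-- pv_equiv track=rewrite | github.com/fangxk2003/projectEuler | 1/p112.py | bc
-- ===== SOURCE A (Python) =====
-- def bc(st) :
--     a = 0
--     b = 0
--     for i in range(1, len(st)) :
--         if (st[i] < st[i - 1]) : a = 1
--         if (st[i] > st[i - 1]) : b = 1
--     if (a and b) : return 1
--     return 0
-- ===== SOURCE B (Python) =====
-- def bc(st):
--     s = list(st)
--     return 1 if s != sorted(s) and s != sorted(s, reverse=True) else 0
-- ===== Notes on version B (the rewrite author's own statement) =====
-- stated objective: simpler
-- what changed: Replaces the index-based flag-accumulating scan of adjacent pairs with comparing the string against its ascending and descending sorted forms: a descent exists iff s != sorted(s), an ascent iff s != sorted(s, reverse=True).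
import Mathlib
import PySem

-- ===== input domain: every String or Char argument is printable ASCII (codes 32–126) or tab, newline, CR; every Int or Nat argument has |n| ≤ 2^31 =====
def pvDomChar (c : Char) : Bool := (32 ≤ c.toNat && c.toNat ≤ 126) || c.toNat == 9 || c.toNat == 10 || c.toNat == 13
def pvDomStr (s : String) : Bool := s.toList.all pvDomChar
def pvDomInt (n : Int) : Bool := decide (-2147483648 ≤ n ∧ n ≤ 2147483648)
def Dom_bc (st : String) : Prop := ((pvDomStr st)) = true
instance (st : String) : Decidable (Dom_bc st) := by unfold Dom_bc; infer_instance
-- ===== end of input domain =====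

-- B replaces A's index-based flag-accumulating scan of adjacent pairs with comparing
-- the string against its two sorted forms (objective: simpler).

-- ===== PORT A =====
-- A's loop 'for i in range(1, len(st))' with the two flag-setting ifs; st[i] via Str.pyGet?
-- (in range(1, len(st)) both indexes are always valid, so the fallthrough branch is unreachable).
def bc (st : String) : Int :=
  let ab :=
    (PySem.List.pyRange 1 (PySem.Str.len st)).foldl
      (fun (ab : Int × Int) (i : Int) =>
        match PySem.Str.pyGet? st i, PySem.Str.pyGet? st (i - 1) with
        | some ci, some cp => (if ci < cp then 1 else ab.1, if ci > cp then 1 else ab.2)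
        | _, _ => ab)
      (0, 0)
  if ab.1 ≠ 0 ∧ ab.2 ≠ 0 then 1 else 0

-- ===== PORT B =====
def bc_alt (st : String) : Int :=
  let s := st.toList
  if s ≠ PySem.List.sorted s (fun x => x) ∧ s ≠ PySem.List.sorted s (fun x => x) true then 1
  else 0

-- ===== PRECONDITION & SPEC =====
def Spec_bc (st : String) (out : Int) : Prop := out = bc_alt st
instance (st : String) (out : Int) : Decidable (Spec_bc st out) := by unfold Spec_bc; infer_instance

-- ===== CLAIM (what is proved, stated in full; the proofs are below) =====
def Claim_equal_bc : Prop := ∀ (st : String), Dom_bc st → Spec_bc st (bc st)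

-- ===== LEMMAS AND PROOFS =====

-- the two conditions A tests at index i, as Booleans on the character list
def pvDesc (cs : List Char) (i : Int) : Bool :=
  match PySem.List.pyGet? cs i, PySem.List.pyGet? cs (i - 1) with
  | some ci, some cp => decide (ci < cp)
  | _, _ => false

def pvAsc (cs : List Char) (i : Int) : Bool :=
  match PySem.List.pyGet? cs i, PySem.List.pyGet? cs (i - 1) with
  | some ci, some cp => decide (ci > cp)
  | _, _ => false

-- A's step function written with the two Booleans
theorem pv_step_eq (cs : List Char) :
    (fun (ab : Int × Int) (i : Int) =>
      match PySem.List.pyGet? cs i, PySem.List.pyGet? cs (i - 1) with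
      | some ci, some cp => (if ci < cp then 1 else ab.1, if ci > cp then 1 else ab.2)
      | _, _ => ab)
    = fun (ab : Int × Int) (i : Int) =>
        (if pvDesc cs i then 1 else ab.1, if pvAsc cs i then 1 else ab.2) := by
  funext ab i
  unfold pvDesc pvAsc
  cases PySem.List.pyGet? cs i <;> cases PySem.List.pyGet? cs (i - 1) <;> simp

-- a flag-setting fold computes 'any'
theorem pv_flag_fold (c1 c2 : Int → Bool) (l : List Int) (a b : Int) :
    l.foldl (fun (ab : Int × Int) (i : Int) =>
        (if c1 i then 1 else ab.1, if c2 i then 1 else ab.2)) (a, b)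
      = (if l.any c1 then 1 else a, if l.any c2 then 1 else b) := by
  induction l generalizing a b with
  | nil => simp
  | cons x l ih =>
    simp only [List.foldl_cons, List.any_cons, ih]
    by_cases h1 : c1 x <;> by_cases h2 : c2 x <;> simp [h1, h2]

-- no descent over range(1, len) ⟺ the list is a ≤-chain
theorem pv_any_desc (cs : List Char) :
    (PySem.List.pyRange 1 (cs.length : Int)).any (pvDesc cs) = false
      ↔ List.IsChain (· ≤ ·) cs := by
  rw [List.isChain_iff_getElem, List.any_eq_false]
  constructor
  · intro h j hj
    have hm : ((j : Int) + 1) ∈ PySem.List.pyRange 1 (cs.length : Int) := by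
      rw [PySem.List.mem_pyRange_one]; omega
    have := h _ hm
    unfold pvDesc at this
    have e1 : ((j : Int) + 1) = ((j + 1 : Nat) : Int) := by omega
    have e2 : ((j : Int) + 1 - 1) = ((j : Nat) : Int) := by omega
    rw [e1] at this
    rw [show ((j + 1 : Nat) : Int) - 1 = ((j : Nat) : Int) by omega] at this
    rw [PySem.List.pyGet?_natCast, PySem.List.pyGet?_natCast] at this
    rw [List.getElem?_eq_getElem hj, List.getElem?_eq_getElem (by omega)] at this
    simpa using le_of_not_gt (by simpa using this)
  · intro h i hi
    rw [PySem.List.mem_pyRange_one] at hi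
    obtain ⟨h1, h2⟩ := hi
    obtain ⟨j, rfl⟩ : ∃ j : Nat, i = (j : Int) + 1 := ⟨(i - 1).toNat, by omega⟩
    unfold pvDesc
    rw [show ((j : Int) + 1) = ((j + 1 : Nat) : Int) by omega,
      show ((j + 1 : Nat) : Int) - 1 = ((j : Nat) : Int) by omega,
      PySem.List.pyGet?_natCast, PySem.List.pyGet?_natCast]
    rw [List.getElem?_eq_getElem (by omega), List.getElem?_eq_getElem (by omega)]
    have := h j (by omega)
    simpa using not_lt_of_ge this

-- no ascent over range(1, len) ⟺ the list is a ≥-chain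
theorem pv_any_asc (cs : List Char) :
    (PySem.List.pyRange 1 (cs.length : Int)).any (pvAsc cs) = false
      ↔ List.IsChain (fun a b => b ≤ a) cs := by
  rw [List.isChain_iff_getElem, List.any_eq_false]
  constructor
  · intro h j hj
    have hm : ((j : Int) + 1) ∈ PySem.List.pyRange 1 (cs.length : Int) := by
      rw [PySem.List.mem_pyRange_one]; omega
    have := h _ hm
    unfold pvAsc at this
    have e1 : ((j : Int) + 1) = ((j + 1 : Nat) : Int) := by omega
    rw [e1] at this
    rw [show ((j + 1 : Nat) : Int) - 1 = ((j : Nat) : Int) by omega] at this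
    rw [PySem.List.pyGet?_natCast, PySem.List.pyGet?_natCast] at this
    rw [List.getElem?_eq_getElem hj, List.getElem?_eq_getElem (by omega)] at this
    simpa using le_of_not_gt (by simpa using this)
  · intro h i hi
    rw [PySem.List.mem_pyRange_one] at hi
    obtain ⟨h1, h2⟩ := hi
    obtain ⟨j, rfl⟩ : ∃ j : Nat, i = (j : Int) + 1 := ⟨(i - 1).toNat, by omega⟩
    unfold pvAsc
    rw [show ((j : Int) + 1) = ((j + 1 : Nat) : Int) by omega,
      show ((j + 1 : Nat) : Int) - 1 = ((j : Nat) : Int) by omega,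
      PySem.List.pyGet?_natCast, PySem.List.pyGet?_natCast]
    rw [List.getElem?_eq_getElem (by omega), List.getElem?_eq_getElem (by omega)]
    have := h j (by omega)
    simpa using not_lt_of_ge this

theorem pv_sorted_iff (cs : List Char) :
    cs = PySem.List.sorted cs (fun x => x) ↔ List.Pairwise (· ≤ ·) cs := by
  constructor
  · intro h
    have := PySem.List.sorted_pairwise cs (fun x => x)
    rw [← h] at this
    simpa using this
  · intro h
    exact (PySem.List.sorted_eq_self_of_pairwise cs (fun x => x) (by simpa using h)).symm

theorem pv_sorted_rev_iff (cs : List Char) :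
    cs = PySem.List.sorted cs (fun x => x) true ↔ List.Pairwise (fun a b => b ≤ a) cs := by
  constructor
  · intro h
    have := PySem.List.sorted_pairwise_rev cs (fun x => x)
    rw [← h] at this
    simpa using this
  · intro h
    exact (PySem.List.sorted_rev_eq_self_of_pairwise cs (fun x => x) (by simpa using h)).symm

theorem pv_chain_le_iff (cs : List Char) :
    List.IsChain (· ≤ ·) cs ↔ List.Pairwise (· ≤ ·) cs :=
  List.isChain_iff_pairwise

theorem pv_chain_ge_iff (cs : List Char) :
    List.IsChain (fun a b : Char => b ≤ a) cs ↔ List.Pairwise (fun a b : Char => b ≤ a) cs :=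
  @List.isChain_iff_pairwise _ _ _ ⟨fun h1 h2 => le_trans h2 h1⟩

theorem pv_flag_ne (x : Bool) : ((if x then (1 : Int) else 0) ≠ 0) ↔ ¬ x = false := by
  cases x <;> simp

-- ===== VERDICT (by name: the statement is the Claim_ definition above) =====
theorem bc_spec : Claim_equal_bc := by
  intro st _
  unfold Spec_bc bc bc_alt
  have hget : ∀ i : Int, PySem.Str.pyGet? st i = PySem.List.pyGet? st.toList i :=
    PySem.Str.pyGet?_eq st
  simp only [PySem.Str.len_eq, hget, pv_step_eq st.toList, pv_flag_fold]
  refine if_congr (and_congr ?_ ?_) rfl rfl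
  · rw [pv_flag_ne, pv_any_desc, pv_chain_le_iff, ← pv_sorted_iff]
  · rw [pv_flag_ne, pv_any_asc, pv_chain_ge_iff, ← pv_sorted_rev_iff]
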